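-- pv_equiv track=rewrite | github.com/otapar/hauki_detector | hauki.py | count_consecutive_vowels
-- ===== SOURCE A (Python) =====
-- def count_consecutive_vowels(inputtext):
--     if inputtext is None:
--         return 0
--     vowels = ['a', 'e','i','o','u','y']
--     count = 0
--     candidate_flag = False
--     consecutive_count = 0
--     for letter in inputtext:
--         if letter in vowels:
--             candidate_flag = True
--             consecutive_count += 1
--         elif candidate_flag == True and consecutive_count > 1:
--             count += 1
--             candidate_flag = False
--             consecutive_count = 0
--         else:
--             candidate_flag = False
--             consecutive_count = 0
--
--     if candidate_flag is True and consecutive_count > 1: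
--         count += 1
--     return count
-- ===== SOURCE B (Python) =====
-- def count_consecutive_vowels(inputtext):
--     if inputtext is None:
--         return 0
--     mask = [False] + [c in 'aeiouy' for c in inputtext]
--     return sum(1 for prev, cur, nxt in zip(mask, mask[1:], mask[2:])
--                if cur and nxt and not prev)
-- ===== Notes on version B (the rewrite author's own statement) =====
-- stated objective: alternative
-- what changed: Replaced A's flag/counter state machine (with post-loop fixup) by a two-stage decomposition: build a boolean vowel mask padded with a leading False, then count run STARTS with a sliding window over triples (prev, cur, nxt) where cur and nxt are vowels and prev is not.
import Mathlib
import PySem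

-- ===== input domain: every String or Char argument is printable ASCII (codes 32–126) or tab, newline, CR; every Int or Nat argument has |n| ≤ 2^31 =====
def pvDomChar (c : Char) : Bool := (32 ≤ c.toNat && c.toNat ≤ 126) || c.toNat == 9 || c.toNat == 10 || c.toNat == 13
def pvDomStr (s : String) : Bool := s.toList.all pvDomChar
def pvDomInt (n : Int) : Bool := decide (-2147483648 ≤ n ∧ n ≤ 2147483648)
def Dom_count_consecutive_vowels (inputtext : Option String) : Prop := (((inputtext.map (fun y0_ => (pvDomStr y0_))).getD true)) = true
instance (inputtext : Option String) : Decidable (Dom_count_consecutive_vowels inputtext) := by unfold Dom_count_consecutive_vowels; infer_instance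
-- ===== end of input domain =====

-- B replaces A's flag/counter state machine with a padded boolean vowel mask and a sliding
-- triple window counting run starts (alternative decomposition; same cost).


-- ===== PORT A =====
-- 'letter in vowels' of A
def pvVowelsA (letter : Char) : Bool := ['a', 'e', 'i', 'o', 'u', 'y'].contains letter

-- the for-loop over the string, state = (candidate_flag, consecutive_count, count);
-- the final 'if candidate_flag is True and consecutive_count > 1' is the [] case
def pvLoopA : List Char → Bool → Int → Int → Int
  | [], candidate_flag, consecutive_count, count =>
      if candidate_flag = true ∧ consecutive_count > 1 then count + 1 else count
  | letter :: rest, candidate_flag, consecutive_count, count =>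
      if pvVowelsA letter then
        pvLoopA rest true (consecutive_count + 1) count
      else if candidate_flag = true ∧ consecutive_count > 1 then
        pvLoopA rest false 0 (count + 1)
      else
        pvLoopA rest false 0 count

def count_consecutive_vowels (inputtext : Option String) : Int :=
  match inputtext with
  | none => 0
  | some s => pvLoopA s.toList false 0 0

-- ===== PORT B =====
-- [c in 'aeiouy' for c in inputtext]
def pvMaskB (s : List Char) : List Bool := s.map (fun c => "aeiouy".toList.contains c)

-- sum(1 for prev, cur, nxt in zip(mask, mask[1:], mask[2:]) if cur and nxt and not prev):
-- the zip of the mask with its two shifts yields exactly the consecutive triples, walked here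
-- by structural recursion (exact: both enumerate the windows left to right and add 1 per hit)
def pvWinB : List Bool → Int
  | prev :: cur :: nxt :: rest =>
      (if cur = true ∧ nxt = true ∧ ¬ prev = true then 1 else 0) + pvWinB (cur :: nxt :: rest)
  | _ => 0

def count_consecutive_vowels_alt (inputtext : Option String) : Int :=
  match inputtext with
  | none => 0
  | some s => pvWinB (false :: pvMaskB s.toList)

-- ===== PRECONDITION & SPEC =====
def Spec_count_consecutive_vowels (inputtext : Option String) (out : Int) : Prop := out = count_consecutive_vowels_alt inputtext
instance (inputtext : Option String) (out : Int) : Decidable (Spec_count_consecutive_vowels inputtext out) := by unfold Spec_count_consecutive_vowels; infer_instance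

-- ===== CLAIM (what is proved, stated in full; the proofs are below) =====
def Claim_equal_count_consecutive_vowels : Prop := ∀ (inputtext : Option String), Dom_count_consecutive_vowels inputtext → Spec_count_consecutive_vowels inputtext (count_consecutive_vowels inputtext)

-- ===== LEMMAS AND PROOFS =====

theorem pvMask_eq (c : Char) : ("aeiouy".toList.contains c) = pvVowelsA c := by
  simp [pvVowelsA]

def pvHeadVowel : List Char → Bool
  | [] => false
  | c :: _ => pvVowelsA c

-- 1 if the run ongoing at entry (length consec, continuing into rest) ends with total length ≥ 2
def pvBonus (consec : Int) (rest : List Char) : Int :=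
  if 2 ≤ consec then 1
  else if consec = 1 ∧ pvHeadVowel rest = true then 1
  else 0

theorem pvLoopA_eq_win (rest : List Char) :
    ∀ (flag : Bool) (consec count : Int), (flag = true ↔ 1 ≤ consec) → 0 ≤ consec →
      pvLoopA rest flag consec count =
        count + pvWinB (flag :: pvMaskB rest) + pvBonus consec rest := by
  induction rest with
  | nil =>
      intro flag consec count hinv hnn
      simp only [pvLoopA, pvMaskB, List.map_nil, pvWinB, pvBonus, pvHeadVowel]
      rcases flag with _ | _
      · have h0 : consec = 0 := by
          have hn : ¬ (1:Int) ≤ consec := fun h => Bool.false_ne_true (hinv.mpr h)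
          omega
        subst h0
        norm_num
      · have h1 : (1:Int) ≤ consec := hinv.mp rfl
        by_cases h2 : 2 ≤ consec
        · rw [if_pos ⟨rfl, by omega⟩, if_pos h2]; ring
        · rw [if_neg (fun h => h2 (by omega)), if_neg h2,
            if_neg (fun h => by simp at h)]
          ring
  | cons c rest ih =>
      intro flag consec count hinv hnn
      by_cases hc : pvVowelsA c = true
      · -- vowel: A extends the run; B sees a true mask entry
        simp only [pvLoopA, hc, if_pos]
        rw [ih true (consec + 1) count (by constructor <;> intro <;> first | omega | rfl) (by omega)]
        simp only [pvMaskB, List.map_cons, pvMask_eq, hc]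
        rcases flag with _ | _
        · have h0 : consec = 0 := by
            have hn : ¬ (1:Int) ≤ consec := fun h => Bool.false_ne_true (hinv.mpr h)
            omega
          subst h0
          rcases rest with _ | ⟨d, rest'⟩
          · simp [pvWinB, pvBonus, pvHeadVowel]
          · by_cases hd : pvVowelsA d = true <;>
              simp [pvWinB, pvBonus, pvHeadVowel, hd] <;> ring
        · have h1 : (1:Int) ≤ consec := hinv.mp rfl
          have hbl : pvBonus (consec + 1) rest = 1 := by
            simp only [pvBonus]; rw [if_pos (by omega)]
          have hbr : pvBonus consec (c :: rest) = 1 := by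
            simp only [pvBonus, pvHeadVowel]
            by_cases h2 : 2 ≤ consec
            · rw [if_pos h2]
            · rw [if_neg h2, if_pos ⟨by omega, hc⟩]
          rw [hbl, hbr]
          rcases rest with _ | ⟨d, rest'⟩
          · simp [pvWinB]
          · simp only [List.map_cons, pvWinB]
            norm_num
      · -- non-vowel: A closes the run (counting it if long enough); B sees a false mask entry
        have hc' : pvVowelsA c = false := by simpa using hc
        simp only [pvLoopA, hc', Bool.false_eq_true, if_false]
        have step : ∀ count' : Int, pvLoopA rest false 0 count' =
            count' + pvWinB (false :: pvMaskB rest) + pvBonus 0 rest := by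
          intro count'; exact ih false 0 count' (by simp) (by omega)
        have hb0 : pvBonus 0 rest = 0 := by
          simp only [pvBonus]
          rw [if_neg (by omega), if_neg (by simp)]
        have hwin : pvWinB (flag :: pvMaskB (c :: rest)) = pvWinB (false :: pvMaskB rest) := by
          simp only [pvMaskB, List.map_cons, pvMask_eq, hc']
          rcases rest with _ | ⟨d, rest'⟩
          · simp [pvWinB]
          · simp only [List.map_cons, pvWinB]
            norm_num
        have hbonus : pvBonus consec (c :: rest) = if flag = true ∧ consec > 1 then 1 else 0 := by
          simp only [pvBonus, pvHeadVowel]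
          rcases flag with _ | _
          · have h0 : consec = 0 := by
              have hn : ¬ (1:Int) ≤ consec := fun h => Bool.false_ne_true (hinv.mpr h)
              omega
            subst h0
            rw [if_neg (by omega), if_neg (by norm_num), if_neg (by norm_num)]
          · have h1 : (1:Int) ≤ consec := hinv.mp rfl
            by_cases h2 : 2 ≤ consec
            · rw [if_pos h2, if_pos ⟨rfl, by omega⟩]
            · rw [if_neg h2, if_neg (fun h => by simp [h.2] at hc'),
                if_neg (fun h => h2 (by have := h.2; omega))]
        by_cases hcnt : flag = true ∧ consec > 1
        · rw [if_pos hcnt, step, hwin, hbonus, if_pos hcnt, hb0]; ring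
        · rw [if_neg hcnt, step, hwin, hbonus, if_neg hcnt, hb0]

-- ===== VERDICT (by name: the statement is the Claim_ definition above) =====
theorem count_consecutive_vowels_spec : Claim_equal_count_consecutive_vowels := by
  intro inputtext _
  unfold Spec_count_consecutive_vowels
  rcases inputtext with _ | s
  · rfl
  · show pvLoopA s.toList false 0 0 = pvWinB (false :: pvMaskB s.toList)
    rw [pvLoopA_eq_win s.toList false 0 0 (by simp) (by omega)]
    simp [pvBonus]
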